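-- pv_equiv track=rewrite | github.com/JvanMeurs/AdventOfCode2024 | day22/day22.py | run_sequence
-- ===== SOURCE A (Python) =====
-- def next_secret_number(sec_nr):
--     sec_nr ^= (sec_nr << 6) & 0xFFFFFF
--     sec_nr ^= (sec_nr >> 5) & 0xFFFFFF
--     sec_nr ^= (sec_nr << 11) & 0xFFFFFF
--     return sec_nr
--
-- def run_sequence(memory,sec_nr,nr_runs,sequences,i,empty_seq):
--     seq = []
--     for _ in range(nr_runs):
--         dig0 = sec_nr % 10
--         if sec_nr not in memory:
--             memory[sec_nr] = next_secret_number(sec_nr)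
--         sec_nr = memory[sec_nr]
--         dig1 = sec_nr % 10
--         seq.append(dig1-dig0)
--         if len(seq) < 4:
--             continue
--         if len(seq) > 4:
--             seq = seq[1:]
--         key = str(seq)
--         if key not in sequences:
--             sequences[key] = empty_seq[:]
--             sequences[key][i] = dig1
--             continue
--         if sequences[key][i] == 0:
--             sequences[key][i] = dig1
--     return sec_nr,sequences
-- ===== SOURCE B (Python) =====
-- # B: two-pass decomposition -- first pass runs the PRNG (with the same memory
-- # cache) collecting parallel change/price lists, second pass slides a window
-- # index over the change list and applies the first-price updates.
-- # Like A, it mutates `memory` and `sequences` in place.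
--
-- def next_secret_number(sec_nr):
--     sec_nr ^= (sec_nr << 6) & 0xFFFFFF
--     sec_nr ^= (sec_nr >> 5) & 0xFFFFFF
--     sec_nr ^= (sec_nr << 11) & 0xFFFFFF
--     return sec_nr
--
-- def run_sequence(memory, sec_nr, nr_runs, sequences, i, empty_seq):
--     changes = []
--     prices = []
--     for _ in range(nr_runs):
--         dig0 = sec_nr % 10
--         if sec_nr not in memory:
--             memory[sec_nr] = next_secret_number(sec_nr)
--         sec_nr = memory[sec_nr]
--         dig1 = sec_nr % 10
--         changes.append(dig1 - dig0)
--         prices.append(dig1)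
--     for j in range(3, nr_runs):
--         key = str(changes[j - 3:j + 1])
--         if key not in sequences:
--             row = empty_seq[:]
--             row[i] = prices[j]
--             sequences[key] = row
--         elif sequences[key][i] == 0:
--             sequences[key][i] = prices[j]
--     return sec_nr, sequences
-- ===== Notes on version B (the rewrite author's own statement) =====
-- stated objective: alternative
-- what changed: A fuses PRNG stepping, a mutable 4-element sliding window list and the dict updates into one loop; B decomposes it into two passes: a first pass that runs the PRNG (same memory cache) into parallel change/price lists, and a second pass that slides an index window over the change list and applies the first-price updates.
import Mathlib
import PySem

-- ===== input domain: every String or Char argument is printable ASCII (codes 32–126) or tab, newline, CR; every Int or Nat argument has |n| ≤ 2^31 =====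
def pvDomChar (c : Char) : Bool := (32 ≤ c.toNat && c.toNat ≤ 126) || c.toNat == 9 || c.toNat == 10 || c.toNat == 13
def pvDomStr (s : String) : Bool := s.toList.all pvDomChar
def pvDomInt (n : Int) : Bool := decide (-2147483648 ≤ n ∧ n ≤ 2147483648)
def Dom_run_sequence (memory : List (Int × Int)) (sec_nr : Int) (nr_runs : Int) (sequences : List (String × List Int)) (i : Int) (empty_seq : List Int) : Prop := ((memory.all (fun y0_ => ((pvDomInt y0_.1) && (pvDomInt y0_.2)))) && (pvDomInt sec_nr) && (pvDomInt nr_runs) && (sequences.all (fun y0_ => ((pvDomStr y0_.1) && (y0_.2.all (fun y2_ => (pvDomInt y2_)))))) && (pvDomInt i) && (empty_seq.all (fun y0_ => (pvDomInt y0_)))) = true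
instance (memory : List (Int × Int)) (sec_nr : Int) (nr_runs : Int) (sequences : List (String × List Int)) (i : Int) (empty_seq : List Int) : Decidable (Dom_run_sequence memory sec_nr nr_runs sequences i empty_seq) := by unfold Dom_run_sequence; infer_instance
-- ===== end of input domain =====

-- B re-decomposes A's single fused loop into a PRNG pass producing change/price
-- lists plus a windowed update pass over them (objective: alternative, same cost).
-- Both Pythons mutate `memory`/`sequences` in place identically wherever A returns;
-- the theorems below are about the RETURN value.

-- shared leaf helper: Python's str(list-of-ints), e.g. "[1, -2, 0, 3]"
def pyListRepr (xs : List Int) : String :=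
  PySem.Str.join "" ["[", PySem.Str.join ", " (xs.map PySem.Int.toStr), "]"]

-- ===== PORT A =====
def next_secret_number (sec_nr : Int) : Int :=
  let s1 := PySem.Int.bxor sec_nr (PySem.Int.band (sec_nr <<< (6 : Nat)) 0xFFFFFF)
  let s2 := PySem.Int.bxor s1 (PySem.Int.band (s1 >>> (5 : Nat)) 0xFFFFFF)
  PySem.Int.bxor s2 (PySem.Int.band (s2 <<< (11 : Nat)) 0xFFFFFF)

-- A's loop, step for step; Option = an uncaught IndexError
def runA_loop (i : Int) (empty_seq : List Int) :
    Nat → PySem.Dict Int Int → Int → List Int → PySem.Dict String (List Int) →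
    Option (Int × PySem.Dict String (List Int))
  | 0, _mem, sec, _seq, seqs => some (sec, seqs)
  | n+1, mem, sec, seq, seqs =>
    let dig0 := PySem.Int.mod sec 10
    let mem := if mem.contains sec then mem else mem.insert sec (next_secret_number sec)
    let sec' := mem.getD sec 0        -- memory[sec_nr]: present after the conditional insert
    let dig1 := PySem.Int.mod sec' 10
    let seq := seq ++ [dig1 - dig0]
    if seq.length < 4 then runA_loop i empty_seq n mem sec' seq seqs
    else
      let seq := if 4 < seq.length then PySem.List.slice seq (some 1) none else seq
      let key := pyListRepr seq
      match seqs.get? key with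
      | none =>
          match PySem.List.pySet? empty_seq i dig1 with
          | none => none
          | some row => runA_loop i empty_seq n mem sec' seq (seqs.insert key row)
      | some v =>
          match PySem.List.pyGet? v i with
          | none => none
          | some x =>
            if x = 0 then
              match PySem.List.pySet? v i dig1 with
              | none => none
              | some v' => runA_loop i empty_seq n mem sec' seq (seqs.insert key v')
            else runA_loop i empty_seq n mem sec' seq seqs

def run_sequence (memory : List (Int × Int)) (sec_nr : Int) (nr_runs : Int) (sequences : List (String × List Int)) (i : Int) (empty_seq : List Int) : Int × (List (String × List Int)) :=
  match runA_loop i empty_seq nr_runs.toNat (PySem.Dict.mk memory) sec_nr [] (PySem.Dict.mk sequences) with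
  | some (s, d) => (s, d.items)
  | none => (0, [])

-- ===== PORT B =====
-- first pass: run the PRNG, collecting the change and price lists
def runB_gen : Nat → PySem.Dict Int Int → Int → List Int → List Int →
    PySem.Dict Int Int × Int × List Int × List Int
  | 0, mem, sec, changes, prices => (mem, sec, changes, prices)
  | n+1, mem, sec, changes, prices =>
    let dig0 := PySem.Int.mod sec 10
    let mem := if mem.contains sec then mem else mem.insert sec (next_secret_number sec)
    let sec' := mem.getD sec 0
    let dig1 := PySem.Int.mod sec' 10
    runB_gen n mem sec' (changes ++ [dig1 - dig0]) (prices ++ [dig1])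

-- second pass: one window update at index j (Option = an uncaught IndexError)
def runB_upd (i : Int) (empty_seq : List Int) (changes prices : List Int)
    (seqs : PySem.Dict String (List Int)) (j : Int) :
    Option (PySem.Dict String (List Int)) :=
  let key := pyListRepr (PySem.List.slice changes (some (j - 3)) (some (j + 1)))
  let p := PySem.List.pyGetD prices j 0     -- j ∈ range(3, nr_runs) is always in range
  match seqs.get? key with
  | none => (PySem.List.pySet? empty_seq i p).map (fun row => seqs.insert key row)
  | some v =>
    match PySem.List.pyGet? v i with
    | none => none
    | some x =>
      if x = 0 then (PySem.List.pySet? v i p).map (fun v' => seqs.insert key v')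
      else some seqs

def run_sequence_alt (memory : List (Int × Int)) (sec_nr : Int) (nr_runs : Int) (sequences : List (String × List Int)) (i : Int) (empty_seq : List Int) : Int × (List (String × List Int)) :=
  match runB_gen nr_runs.toNat (PySem.Dict.mk memory) sec_nr [] [] with
  | (_mem, sec', changes, prices) =>
    match (PySem.List.pyRange 3 nr_runs 1).foldl
        (fun acc j => acc.bind (fun s => runB_upd i empty_seq changes prices s j))
        (some (PySem.Dict.mk sequences)) with
    | some d => (sec', d.items)
    | none => (0, [])

-- ===== PRECONDITION & SPEC =====
-- Pre_ excludes the inputs on which A raises IndexError (i out of range of the row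
-- it assigns/reads once windows start, i.e. when nr_runs ≥ 4). It is mildly narrower
-- than necessary: it constrains every value list in `sequences`, also those whose key
-- no window of the run ever reaches (see claim cites).
def Pre_run_sequence (memory : List (Int × Int)) (sec_nr : Int) (nr_runs : Int) (sequences : List (String × List Int)) (i : Int) (empty_seq : List Int) : Prop :=
  nr_runs < 4 ∨
    (PySem.Raise.InRange empty_seq.length i ∧
     ∀ p ∈ sequences, PySem.Raise.InRange p.2.length i)
instance (memory : List (Int × Int)) (sec_nr : Int) (nr_runs : Int) (sequences : List (String × List Int)) (i : Int) (empty_seq : List Int) : Decidable (Pre_run_sequence memory sec_nr nr_runs sequences i empty_seq) := by unfold Pre_run_sequence; infer_instance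

def pvWitness_run_sequence : (List (Int × Int)) × Int × Int × (List (String × List Int)) × Int × List Int :=
  ([], 123, 6, [], 0, [0, 0])

def Spec_run_sequence (memory : List (Int × Int)) (sec_nr : Int) (nr_runs : Int) (sequences : List (String × List Int)) (i : Int) (empty_seq : List Int) (out : Int × (List (String × List Int))) : Prop := out = run_sequence_alt memory sec_nr nr_runs sequences i empty_seq
instance (memory : List (Int × Int)) (sec_nr : Int) (nr_runs : Int) (sequences : List (String × List Int)) (i : Int) (empty_seq : List Int) (out : Int × (List (String × List Int))) : Decidable (Spec_run_sequence memory sec_nr nr_runs sequences i empty_seq out) := by unfold Spec_run_sequence; infer_instance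

-- ===== CLAIM (what is proved, stated in full; the proofs are below) =====
def Claim_equal_run_sequence : Prop := ∀ (memory : List (Int × Int)) (sec_nr : Int) (nr_runs : Int) (sequences : List (String × List Int)) (i : Int) (empty_seq : List Int), Dom_run_sequence memory sec_nr nr_runs sequences i empty_seq → Pre_run_sequence memory sec_nr nr_runs sequences i empty_seq → Spec_run_sequence memory sec_nr nr_runs sequences i empty_seq (run_sequence memory sec_nr nr_runs sequences i empty_seq)

-- ===== LEMMAS AND PROOFS =====

theorem gen_acc (n : Nat) : ∀ (mem : PySem.Dict Int Int) (sec : Int) (ch pr : List Int),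
    runB_gen n mem sec ch pr =
      ((runB_gen n mem sec [] []).1, (runB_gen n mem sec [] []).2.1,
       ch ++ (runB_gen n mem sec [] []).2.2.1, pr ++ (runB_gen n mem sec [] []).2.2.2) := by
  induction n with
  | zero => intro mem sec ch pr; simp [runB_gen]
  | succ n ih =>
      intro mem sec ch pr
      simp only [runB_gen, List.nil_append]
      rw [ih, ih _ _ [_] [_]]
      simp

theorem fold_none {α β : Type} (l : List α) (g : β → α → Option β) :
    l.foldl (fun acc j => acc.bind (fun s => g s j)) none = none := by
  induction l with
  | nil => rfl
  | cons x t ih => simpa using ih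

theorem window_slice (hist rest : List Int) (c : Int) (h : 3 ≤ hist.length) :
    PySem.List.slice (hist ++ c :: rest) (some ((hist.length : Int) - 3)) (some ((hist.length : Int) + 1))
      = hist.drop (hist.length - 3) ++ [c] := by
  have h3 : ((hist.length : Int) - 3) = ((hist.length - 3 : Nat) : Int) := by omega
  have h4 : ((hist.length : Int) + 1) = ((hist.length + 1 : Nat) : Int) := by omega
  rw [h3, h4, PySem.List.slice_natCast]
  have h5 : (hist.length + 1) - (hist.length - 3) = 4 := by omega
  rw [h5, List.drop_append]
  have h6 : hist.length - 3 - hist.length = 0 := by omega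
  rw [h6, List.drop_zero, List.take_append]
  have h7 : (hist.drop (hist.length - 3)).length ≤ 4 := by simp; omega
  rw [List.take_of_length_le h7]
  have h8 : 4 - (hist.drop (hist.length - 3)).length = 1 := by simp; omega
  rw [h8]
  simp

theorem window_step (hist : List Int) (c : Int) (h : 3 ≤ hist.length) :
    (if 4 < (hist.drop (hist.length - 4) ++ [c]).length
     then PySem.List.slice (hist.drop (hist.length - 4) ++ [c]) (some 1) none
     else hist.drop (hist.length - 4) ++ [c]) = hist.drop (hist.length - 3) ++ [c] := by
  by_cases h4 : 4 ≤ hist.length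
  · rw [if_pos (by simp; omega), PySem.List.slice_from_one, ← List.drop_one,
        List.drop_append]
    have h6 : 1 - (hist.drop (hist.length - 4)).length = 0 := by simp; omega
    rw [h6, List.drop_zero, List.drop_drop]
    have h7 : hist.length - 4 + 1 = hist.length - 3 := by omega
    rw [h7]
  · have e1 : hist.length - 4 = 0 := by omega
    have e2 : hist.length - 3 = 0 := by omega
    rw [if_neg (by simp; omega), e1, e2]

theorem price_at (phist ps : List Int) (p : Int) (j : Int) (h : j = (phist.length : Int)) :
    PySem.List.pyGetD (phist ++ p :: ps) j 0 = p := by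
  rw [h, PySem.List.pyGetD_natCast, List.getD_eq_getElem?_getD,
      List.getElem?_append_right (Nat.le_refl _)]
  simp

theorem drop_succ_append (hist : List Int) (c : Int) (h : 3 ≤ hist.length) :
    (hist ++ [c]).drop ((hist ++ [c]).length - 4) = hist.drop (hist.length - 3) ++ [c] := by
  rw [List.drop_append]
  have e1 : (hist ++ [c]).length - 4 = hist.length - 3 := by simp
  rw [e1]
  have e2 : hist.length - 3 - hist.length = 0 := by omega
  rw [e2, List.drop_zero]

-- the fusion invariant: A's loop from a window of `hist` equals B's second pass
-- over the remaining indices of the full change/price lists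
theorem fuse (i : Int) (empty_seq : List Int) (n : Nat) :
    ∀ (mem : PySem.Dict Int Int) (sec : Int) (hist phist : List Int)
      (seqs : PySem.Dict String (List Int)),
      phist.length = hist.length →
      runA_loop i empty_seq n mem sec (hist.drop (hist.length - 4)) seqs =
        ((PySem.List.pyRange (max (hist.length : Int) 3) ((hist.length : Int) + n) 1).foldl
            (fun acc j => acc.bind (fun s =>
              runB_upd i empty_seq (hist ++ (runB_gen n mem sec [] []).2.2.1)
                (phist ++ (runB_gen n mem sec [] []).2.2.2) s j))
            (some seqs)).map (fun d => ((runB_gen n mem sec [] []).2.1, d)) := by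
  induction n with
  | zero =>
      intro mem sec hist phist seqs hlen
      rw [PySem.List.pyRange_one_eq_nil (by omega : (hist.length : Int) + ((0:Nat) : Int) ≤ max (hist.length : Int) 3)]
      simp [runA_loop, runB_gen]
  | succ n ih =>
      intro mem sec hist phist seqs hlen
      simp only [runA_loop, runB_gen, List.nil_append]
      rw [gen_acc n]
      dsimp only
      set m' := if mem.contains sec = true then mem else mem.insert sec (next_secret_number sec) with hm'
      set s' := m'.getD sec 0 with hs'
      set p := PySem.Int.mod s' 10 with hp
      set c := p - PySem.Int.mod sec 10 with hc
      set S := (runB_gen n m' s' [] []).2.1 with hS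
      set cs := (runB_gen n m' s' [] []).2.2.1 with hcs
      set ps := (runB_gen n m' s' [] []).2.2.2 with hps
      by_cases hlt : hist.length < 3
      · rw [if_pos (by simp; omega)]
        have IH := ih m' s' (hist ++ [c]) (phist ++ [p]) seqs (by simp [hlen])
        simp only [← hS, ← hcs, ← hps] at IH
        have e0 : (hist ++ [c]).length - 4 = 0 := by simp; omega
        rw [e0, List.drop_zero] at IH
        have ed : hist.length - 4 = 0 := by omega
        rw [ed, List.drop_zero]
        simp only [List.append_assoc, List.singleton_append, List.length_append,
          List.length_cons, List.length_nil] at IH ⊢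
        push_cast at IH ⊢
        have e1 : max ((hist.length : Int) + 1) 3 = 3 := by omega
        have e2 : max ((hist.length : Int)) 3 = 3 := by omega
        have e3 : (hist.length : Int) + 1 + (n : Int) = (hist.length : Int) + ((n : Int) + 1) := by ring
        rw [e1, e3] at IH
        rw [e2]
        exact IH
      · rw [if_neg (by simp; omega)]
        have h3 : 3 ≤ hist.length := by omega
        simp only [window_step hist c h3, List.singleton_append]
        -- shared continuation: A's loop from the new window = B's fold over the remaining indices
        have hstep : ∀ seqs' : PySem.Dict String (List Int),
            runA_loop i empty_seq n m' s' (List.drop (hist.length - 3) hist ++ [c]) seqs' =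
              ((PySem.List.pyRange ((hist.length : Int) + 1) ((hist.length : Int) + ((n : Int) + 1)) 1).foldl
                  (fun acc j => acc.bind fun s =>
                    runB_upd i empty_seq (hist ++ c :: cs) (phist ++ p :: ps) s j)
                  (some seqs')).map (fun d => (S, d)) := by
          intro seqs'
          have IH := ih m' s' (hist ++ [c]) (phist ++ [p]) seqs' (by simp [hlen])
          simp only [← hS, ← hcs, ← hps] at IH
          rw [drop_succ_append hist c h3] at IH
          simp only [List.append_assoc, List.singleton_append, List.length_append,
            List.length_cons, List.length_nil] at IH
          push_cast at IH
          have e1 : max ((hist.length : Int) + 1) 3 = (hist.length : Int) + 1 := by omega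
          have e3 : (hist.length : Int) + 1 + (n : Int) = (hist.length : Int) + ((n : Int) + 1) := by ring
          rw [e1, e3] at IH
          exact IH
        -- open up the first index of B's fold
        have hmax : max ((hist.length : Int)) 3 = (hist.length : Int) := by omega
        rw [hmax]
        have hend : (hist.length : Int) + ((n + 1 : Nat) : Int) = (hist.length : Int) + ((n : Int) + 1) := by
          push_cast; ring
        rw [hend]
        have hcons : PySem.List.pyRange ((hist.length : Int)) ((hist.length : Int) + ((n : Int) + 1)) 1 =
            ((hist.length : Int)) :: PySem.List.pyRange ((hist.length : Int) + 1) ((hist.length : Int) + ((n : Int) + 1)) 1 :=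
          PySem.List.pyRange_one_cons (by omega)
        rw [hcons, List.foldl_cons]
        have hb : (Option.bind (some seqs) fun s =>
              runB_upd i empty_seq (hist ++ c :: cs) (phist ++ p :: ps) s ((hist.length : Int))) =
            runB_upd i empty_seq (hist ++ c :: cs) (phist ++ p :: ps) seqs ((hist.length : Int)) := rfl
        rw [hb]
        have hu : runB_upd i empty_seq (hist ++ c :: cs) (phist ++ p :: ps) seqs ((hist.length : Int)) =
            (match seqs.get? (pyListRepr (List.drop (hist.length - 3) hist ++ [c])) with
             | none => (PySem.List.pySet? empty_seq i p).map
                 (fun row => seqs.insert (pyListRepr (List.drop (hist.length - 3) hist ++ [c])) row)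
             | some v =>
               match PySem.List.pyGet? v i with
               | none => none
               | some x =>
                 if x = 0 then
                   (PySem.List.pySet? v i p).map
                     (fun v' => seqs.insert (pyListRepr (List.drop (hist.length - 3) hist ++ [c])) v')
                 else some seqs) := by
          simp only [runB_upd]
          rw [window_slice hist cs c h3, price_at phist ps p ((hist.length : Int)) (by rw [hlen])]
        rw [hu]
        cases hk : seqs.get? (pyListRepr (List.drop (hist.length - 3) hist ++ [c])) with
        | none =>
            cases hset : PySem.List.pySet? empty_seq i p with
            | none => simp [fold_none]
            | some row =>
                simpa using hstep (seqs.insert (pyListRepr (List.drop (hist.length - 3) hist ++ [c])) row)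
        | some v =>
            cases hg : PySem.List.pyGet? v i with
            | none =>
                simp only [hg]
                simp [fold_none]
            | some x =>
                simp only [hg]
                by_cases hx : x = 0
                · simp only [if_pos hx]
                  cases hset : PySem.List.pySet? v i p with
                  | none =>
                      simp only [hset]
                      simp [fold_none]
                  | some v' =>
                      simp only [hset]
                      simpa using hstep (seqs.insert (pyListRepr (List.drop (hist.length - 3) hist ++ [c])) v')
                · simp only [if_neg hx]
                  simpa using hstep seqs

theorem run_sequence_spec_aux (memory : List (Int × Int)) (sec_nr : Int) (nr_runs : Int)
    (sequences : List (String × List Int)) (i : Int) (empty_seq : List Int) :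
    run_sequence memory sec_nr nr_runs sequences i empty_seq =
      run_sequence_alt memory sec_nr nr_runs sequences i empty_seq := by
  unfold run_sequence run_sequence_alt
  have hfuse := fuse i empty_seq nr_runs.toNat (PySem.Dict.mk memory) sec_nr [] []
    (PySem.Dict.mk sequences) rfl
  simp only [List.drop_nil, List.length_nil, List.nil_append, Nat.cast_zero] at hfuse
  have e1 : max (0:Int) 3 = 3 := by omega
  have e2 : (0:Int) + ((nr_runs.toNat : Nat) : Int) = ((nr_runs.toNat : Nat) : Int) := by ring
  rw [e1, e2] at hfuse
  rw [hfuse]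
  have hr : PySem.List.pyRange 3 nr_runs 1 = PySem.List.pyRange 3 ((nr_runs.toNat : Nat) : Int) 1 := by
    rcases le_or_gt 0 nr_runs with h | h
    · rw [Int.toNat_of_nonneg h]
    · rw [PySem.List.pyRange_one_eq_nil (by omega), PySem.List.pyRange_one_eq_nil (by omega)]
  rw [hr]
  rcases hG : runB_gen nr_runs.toNat (PySem.Dict.mk memory) sec_nr [] [] with ⟨M, S, CS, PS⟩
  simp only [hG]
  cases hf : (PySem.List.pyRange 3 ((nr_runs.toNat : Nat) : Int) 1).foldl
      (fun acc j => acc.bind fun s => runB_upd i empty_seq CS PS s j)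
      (some (PySem.Dict.mk sequences)) with
  | none => simp [hf]
  | some d => simp [hf]

-- ===== VERDICT (by name: the statement is the Claim_ definition above) =====
theorem run_sequence_spec : Claim_equal_run_sequence := by
  intro memory sec_nr nr_runs sequences i empty_seq _hdom _hpre
  exact run_sequence_spec_aux memory sec_nr nr_runs sequences i empty_seq
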